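-- pv_equiv track=rewrite | github.com/oselokaiweka/maplecourt-property-mgt | test.py | solution
-- ===== SOURCE A (Python) =====
-- from typing import List
--
-- def solution(k: List[int], x: int, y: int, z: int) -> int:
--     n = len(k)
--     count = 0
--     for i in range(n):
--         for j in range(i+1, n):
--             if abs(k[i] - k[j]) <= x:
--                 for m in range(j+1, n):
--                     if abs(k[j] - k[m]) <= y and abs(k[i] - k[m]) <= z:
--                         count += 1
--     return count
-- ===== SOURCE B (Python) =====
-- from typing import List
--
-- def _bisect_left(s, v):
--     lo, hi = 0, len(s)
--     while lo < hi:
--         mid = (lo + hi) // 2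
--         if s[mid] < v:
--             lo = mid + 1
--         else:
--             hi = mid
--     return lo
--
-- def _bisect_right(s, v):
--     lo, hi = 0, len(s)
--     while lo < hi:
--         mid = (lo + hi) // 2
--         if v < s[mid]:
--             hi = mid
--         else:
--             lo = mid + 1
--     return lo
--
-- def solution(k: List[int], x: int, y: int, z: int) -> int:
--     # j descending; 'suffix' is k[j+1:] kept sorted; the m-loop becomes a
--     # binary-search range count: m qualifies iff k[m] is in [max(b-y,a-z), min(b+y,a+z)].
--     n = len(k)
--     total = 0
--     suffix = []
--     for j in range(n - 1, -1, -1):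
--         b = k[j]
--         for i in range(j):
--             a = k[i]
--             if abs(a - b) <= x:
--                 lo = max(b - y, a - z)
--                 hi = min(b + y, a + z)
--                 if lo <= hi:
--                     total += _bisect_right(suffix, hi) - _bisect_left(suffix, lo)
--         suffix.insert(_bisect_left(suffix, b), b)
--     return total
-- ===== Notes on version B (the rewrite author's own statement) =====
-- stated objective: faster
-- what changed: Instead of three nested index loops, B iterates j descending while maintaining the suffix k[j+1:] as a sorted list, and replaces A's innermost m-loop by a binary-search range count (k[m] must lie in [max(k[j]-y,k[i]-z), min(k[j]+y,k[i]+z)]).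
import Mathlib
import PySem

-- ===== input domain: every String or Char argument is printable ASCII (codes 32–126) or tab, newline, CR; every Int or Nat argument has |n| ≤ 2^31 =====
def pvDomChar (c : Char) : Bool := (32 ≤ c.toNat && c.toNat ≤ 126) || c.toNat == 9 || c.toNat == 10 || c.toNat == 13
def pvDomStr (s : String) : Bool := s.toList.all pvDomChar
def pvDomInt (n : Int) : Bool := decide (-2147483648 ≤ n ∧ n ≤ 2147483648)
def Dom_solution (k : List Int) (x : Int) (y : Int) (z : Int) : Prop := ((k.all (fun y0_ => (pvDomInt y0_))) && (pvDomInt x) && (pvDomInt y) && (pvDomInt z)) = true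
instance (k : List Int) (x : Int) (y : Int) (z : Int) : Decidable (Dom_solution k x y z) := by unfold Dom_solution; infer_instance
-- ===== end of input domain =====

-- B replaces A's innermost m-loop by a binary-search range count over a sorted
-- suffix maintained while j runs downwards: O(n^2 log n) instead of O(n^3).

-- ===== PORT A =====
def solution (k : List Int) (x : Int) (y : Int) (z : Int) : Int :=
  let n : Int := PySem.List.len k
  (PySem.List.pyRange 0 n 1).foldl (fun count i =>
    (PySem.List.pyRange (i + 1) n 1).foldl (fun count j =>
      if |PySem.List.pyGetD k i 0 - PySem.List.pyGetD k j 0| ≤ x then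
        (PySem.List.pyRange (j + 1) n 1).foldl (fun count m =>
          if |PySem.List.pyGetD k j 0 - PySem.List.pyGetD k m 0| ≤ y ∧
             |PySem.List.pyGetD k i 0 - PySem.List.pyGetD k m 0| ≤ z then count + 1
          else count) count
      else count) count) 0

-- ===== PORT B =====
-- Source B's hand-written _bisect_left/_bisect_right are the standard lo/hi halving
-- loops, ported as the PySem primitives PySem.List.bisectLeft/bisectRight (the
-- same loop); 'suffix.insert(pos, b)' is PySem.List.insert.
def solution_alt (k : List Int) (x : Int) (y : Int) (z : Int) : Int :=
  let n : Int := PySem.List.len k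
  ((PySem.List.pyRange (n - 1) (-1) (-1)).foldl (fun (st : Int × List Int) j =>
      let b := PySem.List.pyGetD k j 0
      let t := (PySem.List.pyRange 0 j 1).foldl (fun t i =>
        let a := PySem.List.pyGetD k i 0
        if |a - b| ≤ x then
          let lo := max (b - y) (a - z)
          let hi := min (b + y) (a + z)
          if lo ≤ hi then
            t + ((PySem.List.bisectRight st.2 hi : Int) - (PySem.List.bisectLeft st.2 lo : Int))
          else t
        else t) st.1
      (t, PySem.List.insert st.2 ((PySem.List.bisectLeft st.2 b : Nat) : Int) b))
    ((0 : Int), ([] : List Int))).1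

-- ===== PRECONDITION & SPEC =====
def Spec_solution (k : List Int) (x : Int) (y : Int) (z : Int) (out : Int) : Prop := out = solution_alt k x y z
instance (k : List Int) (x : Int) (y : Int) (z : Int) (out : Int) : Decidable (Spec_solution k x y z out) := by unfold Spec_solution; infer_instance

-- ===== CLAIM (what is proved, stated in full; the proofs are below) =====
def Claim_equal_solution : Prop := ∀ (k : List Int) (x : Int) (y : Int) (z : Int), Dom_solution k x y z → Spec_solution k x y z (solution k x y z)

-- ===== LEMMAS AND PROOFS =====

-- The per-pair (i, j) contribution: number of indices m > j with
-- |k[j]-k[m]| ≤ y and |k[i]-k[m]| ≤ z, provided |k[i]-k[j]| ≤ x.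
def pvG (k : List Int) (x y z : Int) (i j : Int) : Int :=
  if |PySem.List.pyGetD k i 0 - PySem.List.pyGetD k j 0| ≤ x then
    (((k.drop (j + 1).toNat).countP (fun v =>
      decide (|PySem.List.pyGetD k j 0 - v| ≤ y) && decide (|PySem.List.pyGetD k i 0 - v| ≤ z))) : Int)
  else 0

lemma pvPredEq (b a y z v : Int) :
    (decide (max (b - y) (a - z) ≤ v) && decide (v ≤ min (b + y) (a + z)))
      = (decide (|b - v| ≤ y) && decide (|a - v| ≤ z)) := by
  rw [Bool.eq_iff_iff]
  simp only [Bool.and_eq_true, decide_eq_true_eq]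
  rw [max_le_iff, le_min_iff, abs_le, abs_le]
  omega

-- bisect range count on a sorted list = countP of the interval predicate
lemma pvRangeCount (S : List Int) (hs : S.Pairwise (fun a b => a ≤ b)) (lo hi : Int)
    (hle : lo ≤ hi) :
    ((PySem.List.bisectRight S hi : Int) - (PySem.List.bisectLeft S lo : Int))
      = ((S.countP (fun v => decide (lo ≤ v) && decide (v ≤ hi))) : Int) := by
  obtain ⟨hL, hL1, hL2⟩ := PySem.List.bisectLeft_spec S lo hs
  obtain ⟨hR, hR1, hR2⟩ := PySem.List.bisectRight_spec S hi hs
  set L := PySem.List.bisectLeft S lo with hLdef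
  set R := PySem.List.bisectRight S hi with hRdef
  have hLR : L ≤ R := by
    by_contra hcon
    have hcon' : R < L := by omega
    have hRlen : R < S.length := lt_of_lt_of_le hcon' hL
    have h1 := hL1 R hRlen hcon'
    have h2 := hR2 R hRlen (le_refl R)
    omega
  have hsplit : S.countP (fun v => decide (lo ≤ v) && decide (v ≤ hi)) = R - L := by
    conv_lhs => rw [← List.take_append_drop L S,
      ← List.take_append_drop (R - L) (S.drop L)]
    rw [List.countP_append, List.countP_append]
    have hdd : (S.drop L).drop (R - L) = S.drop R := by
      rw [List.drop_drop]; congr 1; omega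
    rw [hdd]
    have h1 : (S.take L).countP (fun v => decide (lo ≤ v) && decide (v ≤ hi)) = 0 := by
      rw [List.countP_eq_zero]
      intro a ha
      obtain ⟨j, hj, he⟩ := List.mem_take_iff_getElem.mp ha
      have hjL : j < L := lt_of_lt_of_le hj (min_le_left _ _)
      have hjlen : j < S.length := lt_of_lt_of_le hj (min_le_right _ _)
      have hlt : S[j] < lo := hL1 j hjlen hjL
      rw [← he]
      simp only [Bool.and_eq_true, decide_eq_true_eq, not_and]
      omega
    have h3 : (S.drop R).countP (fun v => decide (lo ≤ v) && decide (v ≤ hi)) = 0 := by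
      rw [List.countP_eq_zero]
      intro a ha
      obtain ⟨j, hj, he⟩ := List.mem_drop_iff_getElem.mp ha
      have hlt : hi < S[R + j] := hR2 (R + j) (by omega) (Nat.le_add_right _ _)
      rw [← he]
      simp only [Bool.and_eq_true, decide_eq_true_eq, not_and]
      omega
    have h2 : ((S.drop L).take (R - L)).countP
        (fun v => decide (lo ≤ v) && decide (v ≤ hi)) = R - L := by
      have hlen : ((S.drop L).take (R - L)).length = R - L := by
        simp only [List.length_take, List.length_drop]
        omega
      refine Eq.trans (List.countP_eq_length.mpr ?_) hlen
      intro a ha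
      obtain ⟨j, hj, he⟩ := List.mem_take_iff_getElem.mp ha
      have hjRL : j < R - L := lt_of_lt_of_le hj (min_le_left _ _)
      have hjlen : j < (S.drop L).length := lt_of_lt_of_le hj (min_le_right _ _)
      have hjlen' : L + j < S.length := by
        simp only [List.length_drop] at hjlen; omega
      have hget : (S.drop L)[j] = S[L + j] := List.getElem_drop ..
      have hlo : lo ≤ S[L + j] := hL2 (L + j) hjlen' (Nat.le_add_right _ _)
      have hhi : S[L + j] ≤ hi := hR1 (L + j) hjlen' (by omega)
      rw [← he, hget]
      simp only [Bool.and_eq_true, decide_eq_true_eq]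
      exact ⟨hlo, hhi⟩
    omega
  omega

lemma pvInsertSorted (S : List Int) (hs : S.Pairwise (fun a b => a ≤ b)) (v : Int) :
    (PySem.List.insert S ((PySem.List.bisectLeft S v : Nat) : Int) v).Pairwise (fun a b => a ≤ b) ∧
    (PySem.List.insert S ((PySem.List.bisectLeft S v : Nat) : Int) v).Perm (v :: S) := by
  obtain ⟨hL, hL1, hL2⟩ := PySem.List.bisectLeft_spec S v hs
  set L := PySem.List.bisectLeft S v with hLdef
  rw [PySem.List.insert_natCast S L v hL]
  constructor
  · rw [List.pairwise_append]
    refine ⟨hs.sublist (List.take_sublist ..), ?_, ?_⟩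
    · rw [List.pairwise_cons]
      refine ⟨?_, hs.sublist (List.drop_sublist ..)⟩
      intro b hb
      obtain ⟨j, hj, he⟩ := List.mem_drop_iff_getElem.mp hb
      rw [← he]
      exact hL2 (L + j) (by omega) (Nat.le_add_right _ _)
    · intro a ha b hb
      obtain ⟨i, hi, hea⟩ := List.mem_take_iff_getElem.mp ha
      have hiL : i < L := lt_of_lt_of_le hi (min_le_left _ _)
      have hilen : i < S.length := lt_of_lt_of_le hi (min_le_right _ _)
      have hav : S[i] < v := hL1 i hilen hiL
      rcases List.mem_cons.mp hb with hbv | hbd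
      · subst hbv; omega
      · obtain ⟨j, hj, heb⟩ := List.mem_drop_iff_getElem.mp hbd
        rw [← hea, ← heb]
        exact List.pairwise_iff_getElem.mp hs i (L + j) hilen (by omega) (by omega)
  · have hp := List.perm_middle (a := v) (l₁ := S.take L) (l₂ := S.drop L)
    simpa [List.take_append_drop] using hp

lemma pvA_sum (k : List Int) (x y z : Int) :
    solution k x y z
      = ((PySem.List.pyRange 0 (PySem.List.len k) 1).map (fun i =>
          ((PySem.List.pyRange (i + 1) (PySem.List.len k) 1).map (fun j => pvG k x y z i j)).sum)).sum := by
  simp only [solution]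
  rw [PySem.List.foldl_congr_mem _ _
    (fun count i => count + ((PySem.List.pyRange (i + 1) (PySem.List.len k) 1).map
      (fun j => pvG k x y z i j)).sum) 0 ?_]
  · rw [PySem.List.foldl_add, zero_add]
  · intro acc i hi
    obtain ⟨hi0, hin⟩ := PySem.List.mem_pyRange_one.mp hi
    rw [PySem.List.foldl_congr_mem _ _ (fun count j => count + pvG k x y z i j) acc ?_]
    · rw [PySem.List.foldl_add]
    · intro c j hj
      obtain ⟨hj0, hjn⟩ := PySem.List.mem_pyRange_one.mp hj
      by_cases hx : |PySem.List.pyGetD k i 0 - PySem.List.pyGetD k j 0| ≤ x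
      · rw [if_pos hx]
        rw [PySem.List.foldl_ite_add_one
          (fun m => |PySem.List.pyGetD k j 0 - PySem.List.pyGetD k m 0| ≤ y ∧
                    |PySem.List.pyGetD k i 0 - PySem.List.pyGetD k m 0| ≤ z)]
        congr 1
        unfold pvG
        rw [if_pos hx]
        congr 1
        have hmap := PySem.List.map_pyGetD_pyRange k 0 (a := j + 1) (by omega)
        conv_rhs => rw [← hmap]
        rw [List.countP_map]
        apply List.countP_congr
        intro m _
        simp [Function.comp]
      · rw [if_neg hx]
        show c = c + pvG k x y z i j
        unfold pvG
        rw [if_neg hx, add_zero]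

lemma pvBloop (k : List Int) (x y z : Int) :
    ∀ (c : Nat) (t : Int) (S : List Int), c ≤ k.length →
      S.Pairwise (fun a b => a ≤ b) → S.Perm (k.drop c) →
      (((PySem.List.pyRange ((c : Int) - 1) (-1) (-1)).foldl (fun (st : Int × List Int) j =>
          let b := PySem.List.pyGetD k j 0
          let t := (PySem.List.pyRange 0 j 1).foldl (fun t i =>
            let a := PySem.List.pyGetD k i 0
            if |a - b| ≤ x then
              let lo := max (b - y) (a - z)
              let hi := min (b + y) (a + z)
              if lo ≤ hi then
                t + ((PySem.List.bisectRight st.2 hi : Int) - (PySem.List.bisectLeft st.2 lo : Int))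
              else t
            else t) st.1
          (t, PySem.List.insert st.2 ((PySem.List.bisectLeft st.2 b : Nat) : Int) b)) (t, S)).1)
        = t + ((PySem.List.pyRange 0 ((c : Int)) 1).map (fun j =>
            ((PySem.List.pyRange 0 j 1).map (fun i => pvG k x y z i j)).sum)).sum := by
  intro c
  induction c with
  | zero =>
    intro t S hlen hs hperm
    rw [show ((0 : Nat) : Int) - 1 = (-1 : Int) by norm_num,
      PySem.List.pyRange_neg_one_eq_nil (le_refl (-1 : Int)),
      show ((0 : Nat) : Int) = (0 : Int) by norm_num,
      PySem.List.pyRange_one_eq_nil (le_refl (0 : Int))]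
    simp
  | succ c ih =>
    intro t S hlen hs hperm
    have hc : c < k.length := hlen
    rw [show ((c + 1 : Nat) : Int) - 1 = ((c : Nat) : Int) by push_cast; ring,
      PySem.List.pyRange_neg_one_cons (by omega), List.foldl_cons]
    show ((PySem.List.pyRange (((c : Nat) : Int) - 1) (-1) (-1)).foldl (fun (st : Int × List Int) j =>
          let b := PySem.List.pyGetD k j 0
          let t := (PySem.List.pyRange 0 j 1).foldl (fun t i =>
            let a := PySem.List.pyGetD k i 0
            if |a - b| ≤ x then
              let lo := max (b - y) (a - z)
              let hi := min (b + y) (a + z)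
              if lo ≤ hi then
                t + ((PySem.List.bisectRight st.2 hi : Int) - (PySem.List.bisectLeft st.2 lo : Int))
              else t
            else t) st.1
          (t, PySem.List.insert st.2 ((PySem.List.bisectLeft st.2 b : Nat) : Int) b))
        ((PySem.List.pyRange 0 ((c : Nat) : Int) 1).foldl (fun t i =>
            if |PySem.List.pyGetD k i 0 - PySem.List.pyGetD k ((c : Nat) : Int) 0| ≤ x then
              if max (PySem.List.pyGetD k ((c : Nat) : Int) 0 - y) (PySem.List.pyGetD k i 0 - z)
                  ≤ min (PySem.List.pyGetD k ((c : Nat) : Int) 0 + y) (PySem.List.pyGetD k i 0 + z) then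
                t + ((PySem.List.bisectRight S (min (PySem.List.pyGetD k ((c : Nat) : Int) 0 + y) (PySem.List.pyGetD k i 0 + z)) : Int)
                      - (PySem.List.bisectLeft S (max (PySem.List.pyGetD k ((c : Nat) : Int) 0 - y) (PySem.List.pyGetD k i 0 - z)) : Int))
              else t
            else t) t,
          PySem.List.insert S ((PySem.List.bisectLeft S (PySem.List.pyGetD k ((c : Nat) : Int) 0) : Nat) : Int)
            (PySem.List.pyGetD k ((c : Nat) : Int) 0))).1
      = t + ((PySem.List.pyRange 0 (((c + 1 : Nat)) : Int) 1).map (fun j =>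
          ((PySem.List.pyRange 0 j 1).map (fun i => pvG k x y z i j)).sum)).sum
    have hbval : PySem.List.pyGetD k ((c : Nat) : Int) 0 = k[c] := by
      rw [PySem.List.pyGetD_eq_getElem k 0 (by omega) (by exact_mod_cast hc)]
      simp
    obtain ⟨hs', hperm'⟩ := pvInsertSorted S hs (PySem.List.pyGetD k ((c : Nat) : Int) 0)
    have hperm'' : (PySem.List.insert S ((PySem.List.bisectLeft S (PySem.List.pyGetD k ((c : Nat) : Int) 0) : Nat) : Int)
        (PySem.List.pyGetD k ((c : Nat) : Int) 0)).Perm (k.drop c) := by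
      refine hperm'.trans ?_
      rw [List.drop_eq_getElem_cons hc, hbval]
      exact List.Perm.cons _ hperm
    have hidx : (((c : Nat) : Int) + 1).toNat = c + 1 := by omega
    have hinner : (PySem.List.pyRange 0 ((c : Nat) : Int) 1).foldl (fun t i =>
            if |PySem.List.pyGetD k i 0 - PySem.List.pyGetD k ((c : Nat) : Int) 0| ≤ x then
              if max (PySem.List.pyGetD k ((c : Nat) : Int) 0 - y) (PySem.List.pyGetD k i 0 - z)
                  ≤ min (PySem.List.pyGetD k ((c : Nat) : Int) 0 + y) (PySem.List.pyGetD k i 0 + z) then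
                t + ((PySem.List.bisectRight S (min (PySem.List.pyGetD k ((c : Nat) : Int) 0 + y) (PySem.List.pyGetD k i 0 + z)) : Int)
                      - (PySem.List.bisectLeft S (max (PySem.List.pyGetD k ((c : Nat) : Int) 0 - y) (PySem.List.pyGetD k i 0 - z)) : Int))
              else t
            else t) t
        = t + ((PySem.List.pyRange 0 ((c : Nat) : Int) 1).map
            (fun i => pvG k x y z i ((c : Nat) : Int))).sum := by
      rw [PySem.List.foldl_congr_mem _ _ (fun t i => t + pvG k x y z i ((c : Nat) : Int)) t ?_,
        PySem.List.foldl_add]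
      intro acc i hi
      obtain ⟨hi0, hic⟩ := PySem.List.mem_pyRange_one.mp hi
      by_cases hx : |PySem.List.pyGetD k i 0 - PySem.List.pyGetD k ((c : Nat) : Int) 0| ≤ x
      · rw [if_pos hx]
        by_cases hlohi : max (PySem.List.pyGetD k ((c : Nat) : Int) 0 - y) (PySem.List.pyGetD k i 0 - z)
            ≤ min (PySem.List.pyGetD k ((c : Nat) : Int) 0 + y) (PySem.List.pyGetD k i 0 + z)
        · rw [if_pos hlohi, pvRangeCount S hs _ _ hlohi, List.Perm.countP_eq _ hperm]
          show acc + _ = acc + pvG k x y z i ((c : Nat) : Int)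
          congr 1
          unfold pvG
          rw [if_pos hx, hidx]
          congr 1
          apply List.countP_congr
          intro v _
          rw [pvPredEq (PySem.List.pyGetD k ((c : Nat) : Int) 0) (PySem.List.pyGetD k i 0) y z v]
        · rw [if_neg hlohi]
          show acc = acc + pvG k x y z i ((c : Nat) : Int)
          unfold pvG
          rw [if_pos hx, hidx]
          have h0 : (k.drop (c + 1)).countP (fun v =>
              decide (|PySem.List.pyGetD k ((c : Nat) : Int) 0 - v| ≤ y) &&
              decide (|PySem.List.pyGetD k i 0 - v| ≤ z)) = 0 := by
            rw [List.countP_eq_zero]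
            intro v _
            simp only [Bool.and_eq_true, decide_eq_true_eq, not_and, abs_le]
            intro h1 h2 h3
            have hmx : max (PySem.List.pyGetD k ((c : Nat) : Int) 0 - y) (PySem.List.pyGetD k i 0 - z) ≤ v :=
              max_le (by omega) (by omega)
            have hmn : v ≤ min (PySem.List.pyGetD k ((c : Nat) : Int) 0 + y) (PySem.List.pyGetD k i 0 + z) :=
              le_min (by omega) (by omega)
            exact hlohi (le_trans hmx hmn)
          rw [h0]
          simp
      · rw [if_neg hx]
        show acc = acc + pvG k x y z i ((c : Nat) : Int)
        unfold pvG
        rw [if_neg hx, add_zero]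
    rw [hinner, ih _ _ (by omega) hs' hperm'']
    rw [show ((c + 1 : Nat) : Int) = ((c : Nat) : Int) + 1 by push_cast; ring,
      PySem.List.pyRange_one_succ_right (Int.natCast_nonneg c),
      List.map_append, List.sum_append]
    simp only [List.map_cons, List.map_nil, List.sum_cons, List.sum_nil, add_zero]
    ring

lemma pvB_sum (k : List Int) (x y z : Int) :
    solution_alt k x y z
      = ((PySem.List.pyRange 0 (PySem.List.len k) 1).map (fun j =>
          ((PySem.List.pyRange 0 j 1).map (fun i => pvG k x y z i j)).sum)).sum := by
  have h := pvBloop k x y z k.length 0 [] (le_refl _) List.Pairwise.nil (by simp)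
  simp only [solution_alt, PySem.List.len_eq]
  rw [h, zero_add]

lemma pvSwap (f : Int → Int → Int) : ∀ (n : Nat),
    ((PySem.List.pyRange 0 (n : Int) 1).map (fun i =>
        ((PySem.List.pyRange (i + 1) (n : Int) 1).map (fun j => f i j)).sum)).sum
      = ((PySem.List.pyRange 0 (n : Int) 1).map (fun j =>
        ((PySem.List.pyRange 0 j 1).map (fun i => f i j)).sum)).sum := by
  intro n
  induction n with
  | zero =>
    rw [show ((0 : Nat) : Int) = (0 : Int) by norm_num,
      PySem.List.pyRange_one_eq_nil (le_refl (0 : Int))]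
    simp
  | succ n ih =>
    rw [show ((n + 1 : Nat) : Int) = ((n : Nat) : Int) + 1 by push_cast; ring,
      PySem.List.pyRange_one_succ_right (Int.natCast_nonneg n)]
    rw [List.map_append, List.map_append, List.sum_append, List.sum_append]
    simp only [List.map_cons, List.map_nil, List.sum_cons, List.sum_nil]
    have hmapL : (PySem.List.pyRange 0 ((n : Nat) : Int) 1).map (fun i =>
          ((PySem.List.pyRange (i + 1) (((n : Nat) : Int) + 1) 1).map (fun j => f i j)).sum)
        = (PySem.List.pyRange 0 ((n : Nat) : Int) 1).map (fun i =>
          ((PySem.List.pyRange (i + 1) ((n : Nat) : Int) 1).map (fun j => f i j)).sum + f i ((n : Nat) : Int)) := by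
      apply List.map_congr_left
      intro i hi
      obtain ⟨h0, h1⟩ := PySem.List.mem_pyRange_one.mp hi
      rw [PySem.List.pyRange_one_succ_right (by omega), List.map_append, List.sum_append]
      simp
    rw [hmapL, PySem.List.sum_map_add_int, ih,
      PySem.List.pyRange_one_eq_nil (le_refl (((n : Nat) : Int) + 1))]
    simp only [List.map_nil, List.sum_nil, add_zero]

-- ===== VERDICT (by name: the statement is the Claim_ definition above) =====
theorem solution_spec : Claim_equal_solution := by
  intro k x y z _
  show solution k x y z = solution_alt k x y z
  rw [pvA_sum, pvB_sum]
  have h := pvSwap (pvG k x y z) k.length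
  simpa [PySem.List.len] using h
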